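-- pv_equiv track=rewrite | github.com/UsmanTung/AdventOfCode | 2024/dayone/dayone.py | sumOfCountTimes
-- ===== SOURCE A (Python) =====
-- def sumOfCountTimes(arr1, arr2):
--     count = {}
--     sum = 0
--     for v in arr1:
--         if v in count:
--             sum+= v*count[v]
--         else:
--             counter = 0
--             for val in arr2:
--                 if val == v:
--                     counter+=1
--             count[v] = counter
--             sum+=v*counter
--     return sum
-- ===== SOURCE B (Python) =====
-- def sumOfCountTimes(arr1, arr2):
--     c1 = {}
--     for v in arr1:
--         c1[v] = c1.get(v, 0) + 1
--     c2 = {}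
--     for w in arr2:
--         c2[w] = c2.get(w, 0) + 1
--     total = 0
--     for v, m in c1.items():
--         total += v * m * c2.get(v, 0)
--     return total
-- ===== Notes on version B (the rewrite author's own statement) =====
-- stated objective: faster
-- what changed: B builds frequency dictionaries of both lists in one pass each and sums v*mult1(v)*mult2(v) over the distinct keys of arr1, replacing A's per-element scan of arr1 with a lazy inner scan of arr2 per new value.
import Mathlib
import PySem

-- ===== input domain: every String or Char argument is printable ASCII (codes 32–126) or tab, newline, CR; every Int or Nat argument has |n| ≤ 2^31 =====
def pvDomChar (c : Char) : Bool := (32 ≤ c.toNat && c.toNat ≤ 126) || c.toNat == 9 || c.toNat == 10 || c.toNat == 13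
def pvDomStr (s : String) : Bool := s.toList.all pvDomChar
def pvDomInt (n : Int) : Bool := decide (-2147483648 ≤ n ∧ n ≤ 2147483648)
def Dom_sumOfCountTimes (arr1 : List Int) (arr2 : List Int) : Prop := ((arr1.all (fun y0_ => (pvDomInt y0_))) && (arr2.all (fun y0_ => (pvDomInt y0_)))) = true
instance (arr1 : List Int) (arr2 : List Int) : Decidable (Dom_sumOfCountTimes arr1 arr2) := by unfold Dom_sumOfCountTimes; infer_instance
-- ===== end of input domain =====

-- B replaces A's per-element scan of arr1 (with a lazily-filled count cache over arr2)
-- by two one-pass frequency dictionaries and a sum over arr1's distinct keys with multiplicities.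


-- ===== PORT A =====
def sumOfCountTimes (arr1 : List Int) (arr2 : List Int) : Int :=
  (arr1.foldl
    (fun (st : PySem.Dict Int Int × Int) v =>
      if st.1.contains v then
        (st.1, st.2 + v * st.1.getD v 0)
      else
        let counter := arr2.foldl (fun c val => if val == v then c + 1 else c) 0
        (st.1.insert v counter, st.2 + v * counter))
    (PySem.Dict.empty, 0)).2

-- ===== PORT B =====
def sumOfCountTimes_alt (arr1 : List Int) (arr2 : List Int) : Int :=
  let c1 := arr1.foldl (fun d v => d.insert v (d.getD v 0 + 1)) PySem.Dict.empty
  let c2 := arr2.foldl (fun d w => d.insert w (d.getD w 0 + 1)) PySem.Dict.empty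
  c1.items.foldl (fun t p => t + p.1 * p.2 * c2.getD p.1 0) 0

-- ===== PRECONDITION & SPEC =====
def Spec_sumOfCountTimes (arr1 : List Int) (arr2 : List Int) (out : Int) : Prop := out = sumOfCountTimes_alt arr1 arr2
instance (arr1 : List Int) (arr2 : List Int) (out : Int) : Decidable (Spec_sumOfCountTimes arr1 arr2 out) := by unfold Spec_sumOfCountTimes; infer_instance

-- ===== CLAIM (what is proved, stated in full; the proofs are below) =====
def Claim_equal_sumOfCountTimes : Prop := ∀ (arr1 : List Int) (arr2 : List Int), Dom_sumOfCountTimes arr1 arr2 → Spec_sumOfCountTimes arr1 arr2 (sumOfCountTimes arr1 arr2)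

-- ===== LEMMAS AND PROOFS =====

-- A's inner loop over arr2 is list.count
theorem pv_inner_count (arr2 : List Int) (v : Int) :
    arr2.foldl (fun c val => if val == v then c + 1 else c) 0 = (arr2.count v : Int) := by
  rw [PySem.List.foldl_beq_add_one]; ring

-- A's loop invariant, stated for the fold with the inner loop replaced by list.count:
-- the cache holds only arr2-counts, and the sum accumulates v * arr2.count v per element.
theorem pv_A_loop_count (arr2 : List Int) :
    ∀ (l : List Int) (d : PySem.Dict Int Int) (s : Int),
      (∀ v, d.contains v = true → d.getD v 0 = (arr2.count v : Int)) →
      (l.foldl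
        (fun (st : PySem.Dict Int Int × Int) v =>
          if st.1.contains v then
            (st.1, st.2 + v * st.1.getD v 0)
          else
            (st.1.insert v (arr2.count v : Int), st.2 + v * (arr2.count v : Int)))
        (d, s)).2 = s + (l.map (fun v => v * (arr2.count v : Int))).sum := by
  intro l
  induction l with
  | nil => intro d s h; simp
  | cons x rest ih =>
    intro d s h
    simp only [List.foldl_cons]
    by_cases hx : d.contains x = true
    · rw [if_pos hx, ih _ _ h, h x hx]
      simp [List.map_cons]; ring
    · rw [if_neg hx, ih]
      · simp [List.map_cons]; ring
      · intro v hv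
        rw [PySem.Dict.contains_insert] at hv
        by_cases hvx : v = x
        · subst hvx; rw [PySem.Dict.getD_insert_self]
        · simp [hvx] at hv
          rw [PySem.Dict.getD_insert_of_ne]
          · exact h v hv
          · exact hvx

-- A computes the per-element sum of v * arr2.count v
theorem pv_A_loop (arr2 : List Int) (l : List Int) :
    (l.foldl
        (fun (st : PySem.Dict Int Int × Int) v =>
          if st.1.contains v then
            (st.1, st.2 + v * st.1.getD v 0)
          else
            let counter := arr2.foldl (fun c val => if val == v then c + 1 else c) 0
            (st.1.insert v counter, st.2 + v * counter))
        (PySem.Dict.empty, 0)).2 = (l.map (fun v => v * (arr2.count v : Int))).sum := by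
  have hfun : (fun (st : PySem.Dict Int Int × Int) v =>
          if st.1.contains v then
            (st.1, st.2 + v * st.1.getD v 0)
          else
            let counter := arr2.foldl (fun c val => if val == v then c + 1 else c) 0
            (st.1.insert v counter, st.2 + v * counter))
      = (fun (st : PySem.Dict Int Int × Int) v =>
          if st.1.contains v then
            (st.1, st.2 + v * st.1.getD v 0)
          else
            (st.1.insert v (arr2.count v : Int), st.2 + v * (arr2.count v : Int))) := by
    funext st v
    simp only [pv_inner_count]
  rw [hfun, pv_A_loop_count arr2 l PySem.Dict.empty 0]
  · ring
  · intro v hv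
    simp [PySem.Dict.contains_empty] at hv

-- summing (if k = x then c k else 0) over a Nodup list containing x yields c x
theorem pv_sum_delta (c : Int → Int) :
    ∀ (s : List Int) (x : Int), s.Nodup → x ∈ s →
      (s.map (fun k => if k = x then c k else 0)).sum = c x := by
  intro s
  induction s with
  | nil => intro x _ hx; simp at hx
  | cons y t ih =>
    intro x hnd hx
    rcases List.nodup_cons.mp hnd with ⟨hy, hndt⟩
    rcases List.mem_cons.mp hx with hx1 | hx1
    · subst hx1
      have ht : (t.map (fun k => if k = x then c k else 0)) = t.map (fun _ => (0 : Int)) := by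
        apply List.map_congr_left
        intro k hk
        have : k ≠ x := fun hh => hy (hh ▸ hk)
        simp [this]
      simp [ht]
    · have hyx : y ≠ x := fun hh => hy (hh ▸ hx1)
      simp [hyx, ih x hndt hx1]

-- the distinct-keys-with-multiplicity sum equals the per-element sum
theorem pv_dedup_sum (f : Int → Int) :
    ∀ (l : List Int),
      ((PySem.Set.ofList l).map (fun k => (l.count k : Int) * f k)).sum = (l.map f).sum := by
  intro l
  induction l using List.reverseRecOn with
  | nil => simp [PySem.Set.ofList]
  | append_singleton t x ih =>
    rw [PySem.Set.ofList_append_singleton]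
    by_cases hx : x ∈ t
    · rw [PySem.Set.add_of_mem (by simpa [PySem.Set.mem_ofList] using hx)]
      have hsplit : ((PySem.Set.ofList t).map (fun k => ((t ++ [x]).count k : Int) * f k)).sum
          = ((PySem.Set.ofList t).map (fun k => (t.count k : Int) * f k)).sum
            + ((PySem.Set.ofList t).map (fun k => if k = x then f k else 0)).sum := by
        rw [← List.sum_map_add]
        apply congrArg
        apply List.map_congr_left
        intro k hk
        by_cases hkx : k = x
        · subst hkx; simp [List.count_append]; ring
        · simp [List.count_append, hkx, List.count_singleton]
          exact Or.inl (Ne.symm hkx)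
      rw [hsplit, ih, pv_sum_delta f (PySem.Set.ofList t) x (PySem.Set.nodup_ofList t)
        (by simpa [PySem.Set.mem_ofList] using hx)]
      simp
    · rw [PySem.Set.add_of_not_mem (by simpa [PySem.Set.mem_ofList] using hx)]
      rw [List.map_append, List.sum_append]
      have h1 : ((PySem.Set.ofList t).map (fun k => ((t ++ [x]).count k : Int) * f k))
          = ((PySem.Set.ofList t).map (fun k => (t.count k : Int) * f k)) := by
        apply List.map_congr_left
        intro k hk
        have hkx : k ≠ x := by
          intro hh; exact hx (by simpa [PySem.Set.mem_ofList, hh] using hk)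
        simp [List.count_append, List.count_singleton]
        exact Or.inl (Ne.symm hkx)
      rw [h1, ih]
      simp [List.count_append, List.count_singleton, List.count_eq_zero_of_not_mem hx]

-- ===== VERDICT (by name: the statement is the Claim_ definition above) =====
theorem sumOfCountTimes_spec : Claim_equal_sumOfCountTimes := by
  intro arr1 arr2 _
  unfold Spec_sumOfCountTimes sumOfCountTimes sumOfCountTimes_alt
  rw [pv_A_loop]
  simp only [PySem.Dict.foldl_insert_getD_add_one_eq_counter, PySem.Dict.items_counter,
    PySem.Dict.getD_counter]
  rw [PySem.List.foldl_add (g := fun p : Int × Int => p.1 * p.2 * (arr2.count p.1 : Int)),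
    zero_add, List.map_map, ← pv_dedup_sum (fun k => k * (arr2.count k : Int)) arr1]
  apply congrArg
  apply List.map_congr_left
  intro k hk
  simp only [Function.comp]
  ring
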